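-- pv_equiv track=rewrite | github.com/teacherSsamko/TIL | boj/boj1236.py | solution
-- ===== SOURCE A (Python) =====
-- def solution(N, M, castle):
--     rows = [0] * N
--     cols = [0] * M
--     for i in range(N):
--         for j in range(M):
--             if castle[i][j] == 'X':
--                 rows[i] = 1
--                 cols[j] = 1
--
--     return max(rows.count(0), cols.count(0))
--
-- castle = []
-- ===== SOURCE B (Python) =====
-- def solution(N, M, castle):
--     empty_rows = sum(1 for i in range(N) if all(castle[i][j] != 'X' for j in range(M)))
--     empty_cols = sum(1 for j in range(M) if all(castle[i][j] != 'X' for i in range(N)))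
--     return max(empty_rows, empty_cols)
-- ===== Notes on version B (the rewrite author's own statement) =====
-- stated objective: simpler
-- what changed: Replaces the fused marking scan over two mutable 0/1 arrays plus count(0) by two independent declarative counts: rows with no 'X' and columns with no 'X', returning their max.
import Mathlib
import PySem

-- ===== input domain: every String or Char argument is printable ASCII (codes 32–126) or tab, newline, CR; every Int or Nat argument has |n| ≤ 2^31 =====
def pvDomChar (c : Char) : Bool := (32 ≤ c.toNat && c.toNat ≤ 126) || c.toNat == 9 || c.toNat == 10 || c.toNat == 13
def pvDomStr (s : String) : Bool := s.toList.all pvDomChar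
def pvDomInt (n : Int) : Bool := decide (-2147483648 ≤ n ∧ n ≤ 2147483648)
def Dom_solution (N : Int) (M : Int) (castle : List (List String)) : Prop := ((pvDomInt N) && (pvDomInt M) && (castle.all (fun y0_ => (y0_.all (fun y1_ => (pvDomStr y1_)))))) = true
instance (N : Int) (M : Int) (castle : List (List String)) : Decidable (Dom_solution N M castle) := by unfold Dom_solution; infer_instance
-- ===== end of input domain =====

-- B replaces A's fused marking scan (two mutable 0/1 arrays + count(0)) by two independent
-- declarative counts (rows without 'X', columns without 'X'); objective: simpler.

-- ===== PORT A =====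
def solution (N : Int) (M : Int) (castle : List (List String)) : Int :=
  let rows : List Int := List.replicate N.toNat 0
  let cols : List Int := List.replicate M.toNat 0
  let rc := (PySem.List.pyRange 0 N 1).foldl (fun (rc : List Int × List Int) i =>
      (PySem.List.pyRange 0 M 1).foldl (fun (rc : List Int × List Int) j =>
        if PySem.List.pyGetD (PySem.List.pyGetD castle i []) j "" == "X"
        then (PySem.List.pySetD rc.1 i 1, PySem.List.pySetD rc.2 j 1)
        else rc) rc) (rows, cols)
  max (rc.1.count 0 : Int) (rc.2.count 0 : Int)

-- ===== PORT B =====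
def solution_alt (N : Int) (M : Int) (castle : List (List String)) : Int :=
  let emptyRows := ((PySem.List.pyRange 0 N 1).filter (fun i =>
      (PySem.List.pyRange 0 M 1).all (fun j =>
        PySem.List.pyGetD (PySem.List.pyGetD castle i []) j "" != "X"))).length
  let emptyCols := ((PySem.List.pyRange 0 M 1).filter (fun j =>
      (PySem.List.pyRange 0 N 1).all (fun i =>
        PySem.List.pyGetD (PySem.List.pyGetD castle i []) j "" != "X"))).length
  max (emptyRows : Int) (emptyCols : Int)

-- ===== PRECONDITION & SPEC =====
-- Pre_ excludes exactly the inputs on which A raises IndexError: M > 0 together with some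
-- scanned row index ≥ len(castle) or some scanned row shorter than M.
def Pre_solution (N : Int) (M : Int) (castle : List (List String)) : Prop :=
  M ≤ 0 ∨ (N.toNat ≤ castle.length ∧ ∀ row ∈ castle.take N.toNat, M.toNat ≤ row.length)
instance (N : Int) (M : Int) (castle : List (List String)) : Decidable (Pre_solution N M castle) := by unfold Pre_solution; infer_instance

def pvWitness_solution : Int × Int × List (List String) := (2, 2, [["X", "."], [".", "."]])

def Spec_solution (N : Int) (M : Int) (castle : List (List String)) (out : Int) : Prop := out = solution_alt N M castle
instance (N : Int) (M : Int) (castle : List (List String)) (out : Int) : Decidable (Spec_solution N M castle out) := by unfold Spec_solution; infer_instance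

-- ===== CLAIM (what is proved, stated in full; the proofs are below) =====
def Claim_equal_solution : Prop := ∀ (N : Int) (M : Int) (castle : List (List String)), Dom_solution N M castle → Pre_solution N M castle → Spec_solution N M castle (solution N M castle)

-- ===== LEMMAS AND PROOFS =====

-- length is preserved by the marking fold
theorem markFold_length (g : Int → Bool) (L : List Int) (acc : List Int) :
    (L.foldl (fun acc j => if g j then acc.set j.toNat 1 else acc) acc).length = acc.length := by
  induction L generalizing acc with
  | nil => rfl
  | cons a L ih =>
    simp only [List.foldl_cons]
    by_cases h : g a
    · simp [h, ih, List.length_set]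
    · simp [h, ih]

-- the marking fold sets index k to 1 exactly when some listed index maps to k
theorem markFold_getElem? (g : Int → Bool) (L : List Int) (acc : List Int) (k : Nat)
    (hk : k < acc.length) :
    (L.foldl (fun acc j => if g j then acc.set j.toNat 1 else acc) acc)[k]? =
      if ∃ j ∈ L, g j ∧ j.toNat = k then some 1 else (acc[k]?) := by
  induction L generalizing acc with
  | nil => simp
  | cons a L ih =>
    simp only [List.foldl_cons]
    by_cases hg : g a
    · rw [if_pos hg, ih (acc.set a.toNat 1) (by simpa using hk)]
      by_cases hak : a.toNat = k
      · have hR : ∃ j ∈ a :: L, g j ∧ j.toNat = k := ⟨a, List.mem_cons_self, hg, hak⟩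
        rw [if_pos hR]
        by_cases hL : ∃ j ∈ L, g j ∧ j.toNat = k
        · rw [if_pos hL]
        · rw [if_neg hL]
          subst hak
          simp [hk]
      · have hset : (acc.set a.toNat 1)[k]? = acc[k]? := by
          simp [hak]
        rw [hset]
        congr 1
        simp only [List.mem_cons, eq_iff_iff]
        constructor
        · rintro ⟨j, hj, h1, h2⟩; exact ⟨j, Or.inr hj, h1, h2⟩
        · rintro ⟨j, hj, h1, h2⟩
          rcases hj with rfl | hj
          · exact absurd h2 hak
          · exact ⟨j, hj, h1, h2⟩
    · rw [if_neg hg, ih acc hk]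
      congr 1
      simp only [List.mem_cons, eq_iff_iff]
      constructor
      · rintro ⟨j, hj, h1, h2⟩; exact ⟨j, Or.inr hj, h1, h2⟩
      · rintro ⟨j, hj, h1, h2⟩
        rcases hj with rfl | hj
        · exact absurd h1 (by simp [hg])
        · exact ⟨j, hj, h1, h2⟩

-- the nested fold (A's column marking) sets index k to 1 exactly when some cell hits column k
theorem nestedFold_length (g : Int → Int → Bool) (Is Js : List Int) (acc : List Int) :
    (Is.foldl (fun acc i => Js.foldl (fun acc j => if g i j then acc.set j.toNat 1 else acc) acc) acc).length = acc.length := by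
  induction Is generalizing acc with
  | nil => rfl
  | cons a Is ih => simp only [List.foldl_cons]; rw [ih, markFold_length]

theorem nestedFold_getElem? (g : Int → Int → Bool) (Is Js : List Int) (acc : List Int) (k : Nat)
    (hk : k < acc.length) :
    (Is.foldl (fun acc i => Js.foldl (fun acc j => if g i j then acc.set j.toNat 1 else acc) acc) acc)[k]? =
      if ∃ i ∈ Is, ∃ j ∈ Js, g i j ∧ j.toNat = k then some 1 else (acc[k]?) := by
  induction Is generalizing acc with
  | nil => simp
  | cons a Is ih =>
    simp only [List.foldl_cons]
    rw [ih _ (by rw [markFold_length]; exact hk),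
        markFold_getElem? (g a) Js acc k hk]
    by_cases h1 : ∃ i ∈ Is, ∃ j ∈ Js, g i j ∧ j.toNat = k
    · rw [if_pos h1, if_pos]
      obtain ⟨i, hi, hj⟩ := h1
      exact ⟨i, List.mem_cons_of_mem _ hi, hj⟩
    · rw [if_neg h1]
      by_cases h2 : ∃ j ∈ Js, g a j ∧ j.toNat = k
      · rw [if_pos h2, if_pos]
        exact ⟨a, List.mem_cons_self, h2⟩
      · rw [if_neg h2, if_neg]
        rintro ⟨i, hi, hj⟩
        rcases List.mem_cons.mp hi with rfl | hi
        · exact h2 hj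
        · exact h1 ⟨i, hi, hj⟩

-- A's simultaneous pair fold splits into a row fold and a column fold
theorem innerPair (gi : Int → Bool) (i : Int) (Js : List Int) (r c : List Int) :
    (Js.foldl (fun (rc : List Int × List Int) j =>
        if gi j then (rc.1.set i.toNat 1, rc.2.set j.toNat 1) else rc) (r, c)) =
      ((if Js.any gi then r.set i.toNat 1 else r),
       Js.foldl (fun acc j => if gi j then acc.set j.toNat 1 else acc) c) := by
  induction Js generalizing r c with
  | nil => simp
  | cons a Js ih =>
    simp only [List.foldl_cons, List.any_cons]
    by_cases hg : gi a
    · rw [if_pos hg, ih]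
      simp [hg, List.set_set]
    · rw [if_neg hg, ih]
      simp [hg]

theorem pairFold (g : Int → Int → Bool) (Is Js : List Int) (r c : List Int) :
    (Is.foldl (fun (rc : List Int × List Int) i =>
        Js.foldl (fun (rc : List Int × List Int) j =>
          if g i j then (rc.1.set i.toNat 1, rc.2.set j.toNat 1) else rc) rc) (r, c)) =
      (Is.foldl (fun r i => if Js.any (g i) then r.set i.toNat 1 else r) r,
       Is.foldl (fun acc i => Js.foldl (fun acc j => if g i j then acc.set j.toNat 1 else acc) acc) c) := by
  induction Is generalizing r c with
  | nil => rfl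
  | cons a Is ih =>
    simp only [List.foldl_cons]
    rw [innerPair, ih]

-- counting zeros in a 0/1 list characterised elementwise
theorem count_zero_of_getElem? (l : List Int) (n : Nat) (P : Nat → Prop) [DecidablePred P]
    (hlen : l.length = n) (h : ∀ k, k < n → l[k]? = if P k then some 1 else some 0) :
    l.count 0 = ((List.range n).filter (fun k => decide ¬ P k)).length := by
  have hl : l = (List.range n).map (fun k => if P k then (1 : Int) else 0) := by
    apply List.ext_getElem?
    intro k
    by_cases hk : k < n
    · rw [h k hk]
      simp only [List.getElem?_map, List.getElem?_range hk, Option.map_some]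
      split_ifs <;> rfl
    · rw [List.getElem?_eq_none (by omega), List.getElem?_eq_none (by simp; omega)]
  rw [hl, List.count, List.countP_map, ← List.countP_eq_length_filter]
  apply List.countP_congr
  intro k _
  by_cases hP : P k <;> simp [hP]

-- the whole equivalence, with the cell test abstracted as g
theorem core (N M : Int) (g : Int → Int → Bool) :
    (let rows : List Int := List.replicate N.toNat 0
     let cols : List Int := List.replicate M.toNat 0
     let rc := (PySem.List.pyRange 0 N 1).foldl (fun (rc : List Int × List Int) i =>
         (PySem.List.pyRange 0 M 1).foldl (fun (rc : List Int × List Int) j =>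
           if g i j then (PySem.List.pySetD rc.1 i 1, PySem.List.pySetD rc.2 j 1)
           else rc) rc) (rows, cols)
     max (rc.1.count 0 : Int) (rc.2.count 0 : Int)) =
    max (((PySem.List.pyRange 0 N 1).filter (fun i =>
            (PySem.List.pyRange 0 M 1).all (fun j => !(g i j)))).length : Int)
        (((PySem.List.pyRange 0 M 1).filter (fun j =>
            (PySem.List.pyRange 0 N 1).all (fun i => !(g i j)))).length : Int) := by
  dsimp only
  have h1 : (PySem.List.pyRange 0 N 1).foldl (fun (rc : List Int × List Int) i =>
         (PySem.List.pyRange 0 M 1).foldl (fun (rc : List Int × List Int) j =>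
           if g i j then (PySem.List.pySetD rc.1 i 1, PySem.List.pySetD rc.2 j 1)
           else rc) rc) (List.replicate N.toNat 0, List.replicate M.toNat 0) =
      (PySem.List.pyRange 0 N 1).foldl (fun (rc : List Int × List Int) i =>
         (PySem.List.pyRange 0 M 1).foldl (fun (rc : List Int × List Int) j =>
           if g i j then (rc.1.set i.toNat 1, rc.2.set j.toNat 1)
           else rc) rc) (List.replicate N.toNat 0, List.replicate M.toNat 0) := by
    apply List.foldl_ext
    intro rc i hi
    apply List.foldl_ext
    intro rc' j hj
    have h0i : 0 ≤ i := (PySem.List.mem_pyRange_one.1 hi).1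
    have h0j : 0 ≤ j := (PySem.List.mem_pyRange_one.1 hj).1
    by_cases hgij : g i j <;>
      simp [hgij, PySem.List.pySetD_of_nonneg, h0i, h0j]
  rw [h1, pairFold]
  have hrows : ((PySem.List.pyRange 0 N 1).foldl
        (fun r i => if (PySem.List.pyRange 0 M 1).any (g i) then r.set i.toNat 1 else r)
        (List.replicate N.toNat (0:Int))).count 0 =
      ((List.range N.toNat).filter (fun k =>
        decide ¬ (∃ i ∈ PySem.List.pyRange 0 N 1, ((PySem.List.pyRange 0 M 1).any (g i) = true) ∧ i.toNat = k))).length := by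
    apply count_zero_of_getElem?
    · rw [markFold_length]; simp
    · intro k hk
      rw [markFold_getElem? _ _ _ _ (by simpa using hk)]
      simp [hk]
  have hcols : ((PySem.List.pyRange 0 N 1).foldl
        (fun acc i => (PySem.List.pyRange 0 M 1).foldl
          (fun acc j => if g i j then acc.set j.toNat 1 else acc) acc)
        (List.replicate M.toNat (0:Int))).count 0 =
      ((List.range M.toNat).filter (fun k =>
        decide ¬ (∃ i ∈ PySem.List.pyRange 0 N 1, ∃ j ∈ PySem.List.pyRange 0 M 1, (g i j = true) ∧ j.toNat = k))).length := by
    apply count_zero_of_getElem?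
    · rw [nestedFold_length]; simp
    · intro k hk
      rw [nestedFold_getElem? _ _ _ _ _ (by simpa using hk)]
      simp [hk]
  dsimp only
  rw [hrows, hcols]
  congr 1
  · rw [Nat.cast_inj, PySem.List.pyRange_one 0 N]
    simp only [Int.sub_zero, zero_add]
    rw [← List.countP_eq_length_filter, ← List.countP_eq_length_filter, List.countP_map]
    apply List.countP_congr
    intro k hk
    rw [List.mem_range] at hk
    simp only [Function.comp_apply, decide_eq_true_eq, List.mem_map, List.mem_range,
      List.all_eq_true, List.any_eq_true, Bool.not_eq_true']
    constructor
    · intro hne j hj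
      by_contra hgj
      refine absurd ?_ hne
      exact ⟨(k : Int), ⟨k, hk, by simp⟩, ⟨j, hj, by simpa using hgj⟩, by simp⟩
    · rintro hall ⟨i, ⟨k', hk', hik'⟩, ⟨j, hj, hgj⟩, hik⟩
      have hkk : i = (k : Int) := by omega
      rw [hkk] at hgj
      exact absurd hgj (by simpa using hall j hj)
  · rw [Nat.cast_inj, PySem.List.pyRange_one 0 M]
    simp only [Int.sub_zero, zero_add]
    rw [← List.countP_eq_length_filter, ← List.countP_eq_length_filter, List.countP_map]
    apply List.countP_congr
    intro k hk
    rw [List.mem_range] at hk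
    simp only [Function.comp_apply, decide_eq_true_eq, List.mem_map, List.mem_range,
      List.all_eq_true, Bool.not_eq_true']
    constructor
    · intro hne i hi
      by_contra hgi
      refine absurd ?_ hne
      exact ⟨i, hi, (k : Int), ⟨k, hk, rfl⟩, by simpa using hgi, by simp⟩
    · rintro hall ⟨i, hi, j, ⟨a, ha, rfl⟩, hgj, hjk⟩
      have hkk : (a : Int) = (k : Int) := by omega
      rw [hkk] at hgj
      exact absurd hgj (by simp [hall i hi])

-- ===== VERDICT (by name: the statement is the Claim_ definition above) =====
theorem solution_spec : Claim_equal_solution := by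
  intro N M castle _ _
  unfold Spec_solution solution solution_alt
  exact core N M (fun i j => PySem.List.pyGetD (PySem.List.pyGetD castle i []) j "" == "X")
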